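-- pv_equiv track=rewrite | github.com/skyll1111/Infopodgotovka_main | егкр 18.04/5.py | f
-- ===== SOURCE A (Python) =====
-- def to3(n):
--     if n == 0:
--         return '0'
--     res = ''
--     while n > 0:
--         res = str(n % 3) + res
--         n //= 3
--     return res
--
-- def f(n):
--     n3 = to3(n)
--     if n % 3 == 0:
--         n3 = n3 + n3[-2:]
--     else:
--         s = sum(int(x) for x in n3)*2
--         s3 = to3(s)
--         n3 = n3 + s3
--     return int(n3, 3)
-- ===== SOURCE B (Python) =====
-- def f(n):
--     # arithmetic version: no string building, no int(...,3) parsing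
--     if n % 3 == 0:
--         # appending the last two base-3 digits == n*9 + (n mod 9)
--         return n * 9 + n % 9
--     m, s = n, 0
--     while m > 0:          # base-3 digit sum
--         s += m % 3
--         m //= 3
--     s *= 2
--     p = 3                 # smallest power of 3 exceeding s = 3**len(to3(s))
--     while p <= s:
--         p *= 3
--     return n * p + s
-- ===== Notes on version B (the rewrite author's own statement) =====
-- stated objective: simpler
-- what changed: Replaces base-3 string construction and int(...,3) re-parsing with pure arithmetic: the divisible case is the closed form n*9 + n%9, the other case sums base-3 digits with a division loop and appends them via n*p + s where p is the smallest power of 3 exceeding s.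
-- outside the precondition, e.g. on f(-1): A returns 0, B returns -3; on f(-3): A raises ValueError, B returns -21
import Mathlib
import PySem

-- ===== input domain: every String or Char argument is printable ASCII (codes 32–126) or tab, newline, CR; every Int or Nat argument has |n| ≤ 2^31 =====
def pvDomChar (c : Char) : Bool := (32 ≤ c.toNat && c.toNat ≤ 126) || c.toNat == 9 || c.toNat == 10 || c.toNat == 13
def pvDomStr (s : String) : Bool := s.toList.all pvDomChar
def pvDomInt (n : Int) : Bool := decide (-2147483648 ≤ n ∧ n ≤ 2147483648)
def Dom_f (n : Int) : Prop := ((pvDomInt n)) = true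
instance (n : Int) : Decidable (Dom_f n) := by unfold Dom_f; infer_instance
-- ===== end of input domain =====

-- B replaces A's base-3 string building + int(.,3) re-parsing by pure arithmetic (simpler).
-- Python strings are modeled as List Char (the PySem.Chars representation).

-- ===== PORT A =====
-- the while-loop of to3: res = str(n % 3) + res; n //= 3
def to3Loop (n : Int) (res : List Char) : List Char :=
  if 0 < n then
    to3Loop (PySem.Int.floordiv n 3) (PySem.Int.toChars (PySem.Int.mod n 3) ++ res)
  else res
termination_by n.toNat
decreasing_by
  rename_i h
  rw [PySem.Int.floordiv_eq_ediv_of_pos (by norm_num : (0:Int) < 3)]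
  omega

def to3 (n : Int) : List Char := if n = 0 then ['0'] else to3Loop n []

-- int(x) for a single char x: exact for digit characters, the only chars to3 yields
def digitVal (c : Char) : Int := (c.toNat : Int) - 48

-- int(s, 3): hand port, exact for nonempty strings of digits 0-2 — all f builds for n ≥ 0
-- (Pre_f excludes negative n, where the string may be empty and Python raises ValueError)
def parse3 (s : List Char) : Int := s.foldl (fun a c => a * 3 + digitVal c) 0

def f (n : Int) : Int :=
  let n3 := to3 n
  if PySem.Int.mod n 3 = 0 then
    parse3 (n3 ++ PySem.List.slice n3 (some (-2)) none)      -- n3 + n3[-2:]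
  else
    let s := (n3.foldl (fun a c => a + digitVal c) 0) * 2    -- sum(int(x) for x in n3)*2
    parse3 (n3 ++ to3 s)

-- ===== PORT B =====
-- while m > 0: s += m % 3; m //= 3
def digitSumLoop (m s : Int) : Int :=
  if 0 < m then digitSumLoop (PySem.Int.floordiv m 3) (s + PySem.Int.mod m 3) else s
termination_by m.toNat
decreasing_by
  rename_i h
  rw [PySem.Int.floordiv_eq_ediv_of_pos (by norm_num : (0:Int) < 3)]
  omega

-- while p <= s: p *= 3   (the 0 < p conjunct is a totality guard only; p is always a power of 3 here)
def powLoop (s p : Int) : Int :=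
  if 0 < p ∧ p ≤ s then powLoop s (p * 3) else p
termination_by (s + 1 - p).toNat
decreasing_by rename_i h; omega

def f_alt (n : Int) : Int :=
  if PySem.Int.mod n 3 = 0 then n * 9 + PySem.Int.mod n 9
  else
    let s := digitSumLoop n 0 * 2
    n * powLoop s 3 + s

-- ===== PRECONDITION & SPEC =====
-- Pre_f restricts to the natural domain n ≥ 0 of this base-3 digit transform: for negative n,
-- to3 returns '' so A raises ValueError (int('',3), multiples of 3) or returns an accidental 0
-- built from the empty string (non-multiples).
def Pre_f (n : Int) : Prop := 0 ≤ n
instance (n : Int) : Decidable (Pre_f n) := by unfold Pre_f; infer_instance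
def pvWitness_f : Int := 5
def Spec_f (n : Int) (out : Int) : Prop := out = f_alt n
instance (n : Int) (out : Int) : Decidable (Spec_f n out) := by unfold Spec_f; infer_instance

-- ===== CLAIM (what is proved, stated in full; the proofs are below) =====
def Claim_equal_f : Prop := ∀ (n : Int), Dom_f n → Pre_f n → Spec_f n (f n)

-- ===== LEMMAS AND PROOFS =====

-- Nat-level model: big-endian base-3 digit characters of m ([] for 0)
def natDigs : Nat → List Char
  | 0 => []
  | m + 1 => natDigs ((m + 1) / 3) ++ [Char.ofNat (48 + (m + 1) % 3)]
decreasing_by omega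

def natDigitSum : Nat → Nat
  | 0 => 0
  | m + 1 => (m + 1) % 3 + natDigitSum ((m + 1) / 3)
decreasing_by omega

def natPow3Loop (s p : Nat) : Nat :=
  if 0 < p ∧ p ≤ s then natPow3Loop s (p * 3) else p
termination_by s + 1 - p
decreasing_by rename_i h; omega

theorem natDigs_pos (m : Nat) (h : 0 < m) :
    natDigs m = natDigs (m / 3) ++ [Char.ofNat (48 + m % 3)] := by
  cases m with
  | zero => omega
  | succ k => simp [natDigs]

theorem natDigitSum_pos (m : Nat) (h : 0 < m) :
    natDigitSum m = m % 3 + natDigitSum (m / 3) := by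
  cases m with
  | zero => omega
  | succ k => simp [natDigitSum]

theorem toChars_mod3 (m : Nat) :
    PySem.Int.toChars ((m % 3 : Nat) : Int) = [Char.ofNat (48 + m % 3)] := by
  have h : m % 3 < 3 := Nat.mod_lt _ (by norm_num)
  interval_cases h3 : m % 3 <;> decide

theorem to3Loop_eq (m : Nat) (res : List Char) :
    to3Loop (m : Int) res = natDigs m ++ res := by
  rw [to3Loop]
  by_cases h : 0 < m
  · rw [if_pos (by exact_mod_cast h)]
    rw [show PySem.Int.floordiv (m : Int) 3 = ((m / 3 : Nat) : Int) from PySem.Int.floordiv_natCast m 3,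
        show PySem.Int.mod (m : Int) 3 = ((m % 3 : Nat) : Int) from PySem.Int.mod_natCast m 3]
    rw [toChars_mod3, to3Loop_eq (m / 3), natDigs_pos m h]
    simp
  · rw [if_neg (by exact_mod_cast h)]
    have : m = 0 := by omega
    simp [this, natDigs]
termination_by m
decreasing_by omega

theorem to3_eq (m : Nat) (h : 0 < m) : to3 (m : Int) = natDigs m := by
  have hne : m ≠ 0 := by omega
  have hne' : (m : Int) ≠ 0 := by exact_mod_cast hne
  rw [to3, if_neg hne', to3Loop_eq]
  simp

-- parse3 with an accumulator
theorem parse3_from (l : List Char) : ∀ (a : Int),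
    l.foldl (fun x c => x * 3 + digitVal c) a = a * 3 ^ l.length + parse3 l := by
  induction l with
  | nil => intro a; simp [parse3]
  | cons c t ih =>
    intro a
    simp only [List.foldl_cons, List.length_cons, parse3]
    rw [ih (a * 3 + digitVal c), ih (0 * 3 + digitVal c)]
    ring

theorem parse3_append (l1 l2 : List Char) :
    parse3 (l1 ++ l2) = parse3 l1 * 3 ^ l2.length + parse3 l2 := by
  unfold parse3
  rw [List.foldl_append, parse3_from]
  rfl

theorem digitVal_ofNat (k : Nat) (h : k < 3) :
    digitVal (Char.ofNat (48 + k)) = (k : Int) := by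
  interval_cases k <;> decide

theorem parse3_natDigs (m : Nat) : parse3 (natDigs m) = (m : Int) := by
  by_cases h : 0 < m
  · rw [natDigs_pos m h, parse3_append, parse3_natDigs (m / 3)]
    simp only [List.length_cons, List.length_nil, pow_one, parse3, List.foldl_cons,
      List.foldl_nil, zero_mul, zero_add]
    rw [digitVal_ofNat (m % 3) (Nat.mod_lt _ (by norm_num))]
    push_cast
    omega
  · have : m = 0 := by omega
    simp [this, natDigs, parse3]
termination_by m
decreasing_by omega

theorem foldl_digitSum (m : Nat) : ∀ (a : Int),
    (natDigs m).foldl (fun x c => x + digitVal c) a = a + (natDigitSum m : Int) := by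
  by_cases h : 0 < m
  · intro a
    rw [natDigs_pos m h, List.foldl_append, foldl_digitSum (m / 3) a]
    simp only [List.foldl_cons, List.foldl_nil]
    rw [digitVal_ofNat (m % 3) (Nat.mod_lt _ (by norm_num)), natDigitSum_pos m h]
    push_cast
    ring
  · have : m = 0 := by omega
    intro a; simp [this, natDigs, natDigitSum]
termination_by m
decreasing_by omega

theorem digitSumLoop_eq (m : Nat) : ∀ (s : Int),
    digitSumLoop (m : Int) s = s + (natDigitSum m : Int) := by
  intro s
  rw [digitSumLoop]
  by_cases h : 0 < m
  · rw [if_pos (by exact_mod_cast h)]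
    rw [show PySem.Int.floordiv (m : Int) 3 = ((m / 3 : Nat) : Int) from PySem.Int.floordiv_natCast m 3,
        show PySem.Int.mod (m : Int) 3 = ((m % 3 : Nat) : Int) from PySem.Int.mod_natCast m 3]
    rw [digitSumLoop_eq (m / 3), natDigitSum_pos m h]
    push_cast
    ring
  · rw [if_neg (by exact_mod_cast h)]
    have : m = 0 := by omega
    simp [this, natDigitSum]
termination_by m
decreasing_by omega

theorem powLoop_cast (s p : Nat) : powLoop (s : Int) (p : Int) = (natPow3Loop s p : Int) := by
  rw [powLoop, natPow3Loop]
  by_cases h : 0 < p ∧ p ≤ s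
  · rw [if_pos (by exact_mod_cast h), if_pos h]
    rw [show ((p : Int) * 3) = ((p * 3 : Nat) : Int) by push_cast; ring]
    exact powLoop_cast s (p * 3)
  · rw [if_neg (by exact_mod_cast h), if_neg h]
termination_by s + 1 - p
decreasing_by omega

theorem natDigs_bounds (m : Nat) (h : 1 ≤ m) :
    1 ≤ (natDigs m).length ∧ 3 ^ ((natDigs m).length - 1) ≤ m ∧ m < 3 ^ (natDigs m).length := by
  by_cases h3 : 3 ≤ m
  · have h1 : 1 ≤ m / 3 := by omega
    obtain ⟨hl, hlo, hhi⟩ := natDigs_bounds (m / 3) h1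
    rw [natDigs_pos m (by omega)]
    simp only [List.length_append, List.length_cons, List.length_nil]
    refine ⟨by omega, ?_, ?_⟩
    · have : 3 ^ ((natDigs (m / 3)).length + 1 - 1) = 3 * 3 ^ ((natDigs (m / 3)).length - 1) := by
        rw [Nat.add_sub_cancel, ← pow_succ']
        congr 1
        omega
      rw [this]
      omega
    · have : 3 ^ ((natDigs (m / 3)).length + 1) = 3 * 3 ^ (natDigs (m / 3)).length := by
        rw [pow_succ]; ring
      rw [this]
      omega
  · rw [natDigs_pos m (by omega)]
    have : m / 3 = 0 := by omega
    rw [this]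
    simp [natDigs]
    omega
termination_by m
decreasing_by omega

theorem len_le_iff (m k : Nat) (hm : 1 ≤ m) : (natDigs m).length ≤ k ↔ m < 3 ^ k := by
  obtain ⟨hl, hlo, hhi⟩ := natDigs_bounds m hm
  constructor
  · intro h
    exact lt_of_lt_of_le hhi (Nat.pow_le_pow_right (by norm_num) h)
  · intro h
    by_contra hc
    have : 3 ^ k ≤ 3 ^ ((natDigs m).length - 1) :=
      Nat.pow_le_pow_right (by norm_num) (by omega)
    omega

theorem natPow3Loop_eq (s k : Nat) (hs : 1 ≤ s) :
    natPow3Loop s (3 ^ k) = 3 ^ (max k (natDigs s).length) := by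
  rw [natPow3Loop]
  by_cases h : 3 ^ k ≤ s
  · rw [if_pos ⟨pow_pos (by norm_num : (0:Nat) < 3) k, h⟩]
    rw [show (3:Nat) ^ k * 3 = 3 ^ (k + 1) from (pow_succ 3 k).symm]
    rw [natPow3Loop_eq s (k + 1) hs]
    have hk : k + 1 ≤ (natDigs s).length := by
      by_contra hc
      have := (len_le_iff s k hs).mp (by omega)
      omega
    rw [Nat.max_eq_right hk, Nat.max_eq_right (by omega)]
  · rw [if_neg (fun hc => h hc.2)]
    have : (natDigs s).length ≤ k := (len_le_iff s k hs).mpr (by omega)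
    rw [Nat.max_eq_left this]
termination_by s + 1 - 3 ^ k
decreasing_by
  have h1 : 3 ^ k < 3 ^ (k + 1) := Nat.pow_lt_pow_right (by norm_num) (by omega)
  omega

theorem natDigitSum_pos_of_pos (m : Nat) (h : 1 ≤ m) : 1 ≤ natDigitSum m := by
  rw [natDigitSum_pos m h]
  by_cases h3 : m % 3 = 0
  · have : 1 ≤ m / 3 := by omega
    have := natDigitSum_pos_of_pos (m / 3) this
    omega
  · omega
termination_by m
decreasing_by omega

-- last two base-3 digits of m ≥ 3 read off m % 9
theorem natDigs_split9 (m : Nat) (h : 3 ≤ m) :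
    natDigs m = natDigs (m / 9) ++ [Char.ofNat (48 + (m / 3) % 3), Char.ofNat (48 + m % 3)] := by
  rw [natDigs_pos m (by omega), natDigs_pos (m / 3) (by omega)]
  have : m / 3 / 3 = m / 9 := by omega
  rw [this]
  simp

-- ===== VERDICT (by name: the statement is the Claim_ definition above) =====
theorem f_spec : Claim_equal_f := by
  intro n _ hpre
  unfold Spec_f f f_alt
  dsimp only
  have hn : n = (n.toNat : Int) := (Int.toNat_of_nonneg hpre).symm
  set m : Nat := n.toNat with hm
  by_cases hdiv : PySem.Int.mod n 3 = 0
  · rw [if_pos hdiv, if_pos hdiv]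
    by_cases h0 : n = 0
    · subst h0; decide
    · -- n divisible by 3, n ≥ 3
      have hmod : PySem.Int.mod (m : Int) 3 = ((m % 3 : Nat) : Int) := PySem.Int.mod_natCast m 3
      have hm3 : m % 3 = 0 := by
        rw [hn] at hdiv; rw [hmod] at hdiv; exact_mod_cast hdiv
      have hm3' : 3 ≤ m := by omega
      rw [hn, to3_eq m (by omega)]
      rw [natDigs_split9 m hm3']
      have hlen : (natDigs (m / 9) ++ [Char.ofNat (48 + m / 3 % 3), Char.ofNat (48 + m % 3)]).length
          = (natDigs (m / 9)).length + 2 := by simp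
      rw [PySem.List.slice_from_neg_ofNat _ 2 (by omega)]
      rw [hlen, Nat.add_sub_cancel, List.drop_append_of_le_length (by simp), List.drop_length,
          List.nil_append]
      rw [parse3_append]
      rw [show (natDigs (m / 9) ++ [Char.ofNat (48 + m / 3 % 3), Char.ofNat (48 + m % 3)]) =
            natDigs m from (natDigs_split9 m hm3').symm]
      rw [parse3_natDigs]
      simp only [List.length_cons, List.length_nil, parse3, List.foldl_cons, List.foldl_nil,
        zero_mul, zero_add]
      rw [digitVal_ofNat (m / 3 % 3) (Nat.mod_lt _ (by norm_num)),
          digitVal_ofNat (m % 3) (Nat.mod_lt _ (by norm_num))]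
      rw [show PySem.Int.mod ((m:Nat) : Int) 9 = ((m % 9 : Nat) : Int) from by exact_mod_cast PySem.Int.mod_natCast m 9]
      norm_num
      omega
  · rw [if_neg hdiv, if_neg hdiv]
    have hm1 : 1 ≤ m := by
      rcases Nat.eq_zero_or_pos m with h | h
      · exfalso; apply hdiv; rw [hn, h]; decide
      · exact h
    rw [hn, to3_eq m hm1, foldl_digitSum m 0]
    set ds : Nat := natDigitSum m with hds
    have hds1 : 1 ≤ ds := natDigitSum_pos_of_pos m hm1
    rw [digitSumLoop_eq m 0]
    have hcast : (0 : Int) + (ds : Int) = (ds : Int) := by ring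
    rw [hcast, show ((ds : Int)) * 2 = ((ds * 2 : Nat) : Int) by push_cast; ring]
    set s : Nat := ds * 2 with hs
    have hs1 : 1 ≤ s := by omega
    rw [to3_eq s hs1, parse3_append, parse3_natDigs m, parse3_natDigs s]
    rw [show ((3:Int)) = ((3:Nat) : Int) by norm_num]
    rw [show ((3:Nat) : Int) = ((3 ^ 1 : Nat) : Int) by norm_num]
    rw [powLoop_cast s (3 ^ 1), natPow3Loop_eq s 1 hs1]
    have hmax : max 1 (natDigs s).length = (natDigs s).length :=
      Nat.max_eq_right (natDigs_bounds s hs1).1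
    rw [hmax]
    push_cast
    ring
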